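-- pv_equiv track=rewrite | github.com/stable-lab/Pro-V | src/testbench_parse.py | split_test_cases
-- ===== SOURCE A (Python) =====
-- def split_test_cases(line):
--     """Split a line containing multiple test cases into individual test cases."""
--     # Find all occurrences of [True, {'out': ...}]
--     start = 0
--     test_cases = []
--     while True:
--         # Find the start of a test case
--         start = line.find('[True, {', start)
--         if start == -1:
--             break
--
--         # Find the matching closing bracket
--         bracket_count = 1
--         pos = start + 1
--         while bracket_count > 0 and pos < len(line):
--             if line[pos] == '[':
--                 bracket_count += 1
--             elif line[pos] == ']':
--                 bracket_count -= 1
--             pos += 1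
--
--         if bracket_count == 0:
--             test_case = line[start:pos]
--             test_cases.append(test_case)
--             start = pos
--         else:
--             break
--
--     return test_cases
-- ===== SOURCE B (Python) =====
-- def split_test_cases(line):
--     """Split a line containing multiple test cases into individual test cases.
--
--     Staged passes: (1) collect every marker position, (2) build a bracket-depth
--     prefix-sum array D, (3) walk the marker list, locating each case's closing
--     bracket by looking for the target value in D instead of running a counter.
--     """
--     n = len(line)
--     markers = [i for i in range(n) if line.startswith('[True, {', i)]
--     D = [0] * (n + 1)
--     for k in range(n):
--         D[k + 1] = D[k] + (line[k] == '[') - (line[k] == ']')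
--     test_cases = []
--     start = 0
--     for s in markers:
--         if s < start:
--             continue
--         target = D[s + 1] - 1
--         end = None
--         for j in range(s + 1, n):
--             if D[j + 1] == target:
--                 end = j + 1
--                 break
--         if end is None:
--             break
--         test_cases.append(line[s:end])
--         start = end
--     return test_cases
-- ===== Notes on version B (the rewrite author's own statement) =====
-- stated objective: alternative
-- what changed: B precomputes all marker positions as a list and a bracket-depth prefix-sum array in staged passes, then finds each case's closing bracket by looking up the target depth value in the array, instead of A's interleaved find() calls and running bracket counters.
import Mathlib
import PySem

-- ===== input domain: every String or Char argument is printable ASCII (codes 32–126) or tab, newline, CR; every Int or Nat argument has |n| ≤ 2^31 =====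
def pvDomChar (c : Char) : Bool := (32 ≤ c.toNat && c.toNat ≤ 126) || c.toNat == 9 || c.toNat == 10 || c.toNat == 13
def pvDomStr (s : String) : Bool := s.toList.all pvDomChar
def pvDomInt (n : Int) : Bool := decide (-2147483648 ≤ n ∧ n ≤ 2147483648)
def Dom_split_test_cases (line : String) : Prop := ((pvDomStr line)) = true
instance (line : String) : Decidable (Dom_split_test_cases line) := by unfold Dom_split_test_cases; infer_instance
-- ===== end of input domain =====

-- B precomputes marker positions and a bracket-depth prefix-sum array in staged passes and finds each closing bracket by a value lookup in that array (alternative decomposition, same cost).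


-- ===== PORT A =====
-- the marker '[True, {' as a list of characters
def pvPat : List Char := "[True, {".toList

-- Python's line.startswith('[True, {', i) for 0 ≤ i (exact: a prefix test on the suffix)
def pvStartsAt (cs : List Char) (i : Nat) : Bool := pvPat.isPrefixOf (cs.drop i)

-- exact hand port of Python's line.find('[True, {', start) for 0 ≤ start and this
-- nonempty pattern: least index i ≥ start where the pattern starts, none = -1;
-- fuel is only a structural bound on the scan (callers pass cs.length, always enough)
def pvFindFrom (cs : List Char) : Nat → Nat → Option Nat
  | 0, _ => none
  | fuel + 1, i =>
    if i < cs.length then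
      if pvStartsAt cs i then some i else pvFindFrom cs fuel (i + 1)
    else none

-- A's inner loop: while bracket_count > 0 and pos < len(line); returns (bracket_count, pos);
-- fuel is only a structural bound (callers pass cs.length, always enough)
def pvBracket (cs : List Char) : Nat → Int → Nat → Int × Nat
  | 0, count, pos => (count, pos)
  | fuel + 1, count, pos =>
    if h : 0 < count ∧ pos < cs.length then
      pvBracket cs fuel (if cs[pos]'h.2 = '[' then count + 1 else if cs[pos]'h.2 = ']' then count - 1 else count) (pos + 1)
    else (count, pos)

-- A's outer while-True loop: start = line.find('[True, {', start); bracket-match; append; repeat;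
-- fuel is only a structural bound on the iterations (the wrapper passes cs.length + 1)
def pvOuterA (cs : List Char) : Nat → Nat → List String → List String
  | 0, _, acc => acc
  | fuel + 1, start, acc =>
    match pvFindFrom cs cs.length start with
    | none => acc
    | some s =>
      let r := pvBracket cs cs.length 1 (s + 1)
      if r.1 = 0 then
        pvOuterA cs fuel r.2 (acc ++ [String.ofList (PySem.List.slice cs (some (s : Int)) (some (r.2 : Int)))])
      else acc

def split_test_cases (line : String) : List String :=
  pvOuterA line.toList (line.toList.length + 1) 0 []

-- ===== PORT B =====
-- pass 1: [i for i in range(n) if line.startswith('[True, {', i)]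
def pvMarkers (cs : List Char) : List Nat :=
  (List.range cs.length).filter (fun i => pvStartsAt cs i)

-- pass 2: the prefix-sum array D, D[k] = #'[' − #']' in line[:k]; built front-to-back like the Python loop
def pvMkD : List Char → Int → List Int
  | [], d => [d]
  | c :: rest, d => d :: pvMkD rest (d + (if c = '[' then 1 else 0) - (if c = ']' then 1 else 0))

-- B's inner search: for j in range(s+1, n): if D[j+1] == target: end = j+1; break
-- (fuel = number of remaining loop iterations, n − j; exact)
def pvFindEnd (D : List Int) (target : Int) : Nat → Nat → Option Nat
  | 0, _ => none
  | fuel + 1, j => if D.getD (j + 1) 0 = target then some (j + 1) else pvFindEnd D target fuel (j + 1)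

-- pass 3: the for-loop over the precomputed marker list
def pvOuterB (cs : List Char) (D : List Int) : List Nat → Nat → List String → List String
  | [], _, acc => acc
  | s :: ms, start, acc =>
    if s < start then pvOuterB cs D ms start acc
    else
      match pvFindEnd D (D.getD (s + 1) 0 - 1) (cs.length - (s + 1)) (s + 1) with
      | none => acc
      | some e => pvOuterB cs D ms e (acc ++ [String.ofList (PySem.List.slice cs (some (s : Int)) (some (e : Int)))])

def split_test_cases_alt (line : String) : List String :=
  pvOuterB line.toList (pvMkD line.toList 0) (pvMarkers line.toList) 0 []

-- ===== PRECONDITION & SPEC =====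
def Spec_split_test_cases (line : String) (out : List String) : Prop := out = split_test_cases_alt line
instance (line : String) (out : List String) : Decidable (Spec_split_test_cases line out) := by unfold Spec_split_test_cases; infer_instance

-- ===== CLAIM (what is proved, stated in full; the proofs are below) =====
def Claim_equal_split_test_cases : Prop := ∀ (line : String), Dom_split_test_cases line → Spec_split_test_cases line (split_test_cases line)

-- ===== LEMMAS AND PROOFS =====

theorem pvMkD_step (cs : List Char) : ∀ (d : Int) (k : Nat) (h : k < cs.length),
    (pvMkD cs d).getD (k + 1) 0 =
      (pvMkD cs d).getD k 0 + (if cs[k]'h = '[' then 1 else 0) - (if cs[k]'h = ']' then 1 else 0) := by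
  induction cs with
  | nil => intro d k h; simp at h
  | cons c rest ih =>
    intro d k h
    cases k with
    | zero => cases rest <;> rfl
    | succ k' =>
      have h' : k' < rest.length := by simpa using Nat.lt_of_succ_lt_succ h
      simpa [pvMkD] using ih _ k' h'

theorem pvBracket_stop (cs : List Char) (fuel : Nat) (d : Int) (pos : Nat)
    (h : ¬ (0 < d ∧ pos < cs.length)) : pvBracket cs fuel d pos = (d, pos) := by
  cases fuel with
  | zero => rfl
  | succ f => rw [pvBracket, dif_neg h]

-- core: A's bracket counter agrees with B's target-value search in the prefix-sum array
theorem pvBrCore (cs : List Char) : ∀ (k pos : Nat) (d : Int) (fuel : Nat),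
    cs.length - pos ≤ k → 0 < d → cs.length - pos ≤ fuel →
    (∀ e, pvFindEnd (pvMkD cs 0) ((pvMkD cs 0).getD pos 0 - d) (cs.length - pos) pos = some e →
        pvBracket cs fuel d pos = (0, e) ∧ pos < e ∧ e ≤ cs.length) ∧
    (pvFindEnd (pvMkD cs 0) ((pvMkD cs 0).getD pos 0 - d) (cs.length - pos) pos = none →
        (pvBracket cs fuel d pos).1 ≠ 0) := by
  intro k
  induction k with
  | zero =>
    intro pos d fuel hk hd hfuel
    have hge : ¬ pos < cs.length := by omega
    have h0 : cs.length - pos = 0 := by omega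
    rw [h0]
    constructor
    · intro e he; exact absurd he (by simp [pvFindEnd])
    · intro _; rw [pvBracket_stop cs fuel d pos (by omega)]; simpa using (by omega : d ≠ 0)
  | succ k ih =>
    intro pos d fuel hk hd hfuel
    by_cases hlt : pos < cs.length
    · obtain ⟨m, hm⟩ : ∃ m, cs.length - pos = m + 1 := ⟨cs.length - pos - 1, by omega⟩
      obtain ⟨f, rfl⟩ : ∃ f, fuel = f + 1 := ⟨fuel - 1, by omega⟩
      have hm' : cs.length - (pos + 1) = m := by omega
      have hstep := pvMkD_step cs 0 pos hlt
      set D := pvMkD cs 0 with hD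
      set d' : Int := if cs[pos]'hlt = '[' then d + 1 else if cs[pos]'hlt = ']' then d - 1 else d with hd'
      have hbr : pvBracket cs (f + 1) d pos = pvBracket cs f d' (pos + 1) := by
        rw [pvBracket, dif_pos ⟨hd, hlt⟩]
      have hDrel : D.getD (pos + 1) 0 - d' = D.getD pos 0 - d + (1 - 1) := by
        rw [hstep, hd']
        by_cases h1 : cs[pos]'hlt = '[' <;> by_cases h2 : cs[pos]'hlt = ']' <;>
          simp [h1, h2] <;> try omega
      have hDrel' : D.getD (pos + 1) 0 - d' = D.getD pos 0 - d := by omega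
      rw [hm, pvFindEnd]
      by_cases hzero : D.getD (pos + 1) 0 = D.getD pos 0 - d
      · -- count hits 0 at pos: end = pos + 1
        have hd'0 : d' = 0 := by omega
        rw [if_pos hzero]
        constructor
        · intro e he
          have he' : e = pos + 1 := by simpa using he.symm
          subst he'
          refine ⟨?_, by omega, by omega⟩
          rw [hbr, hd'0, pvBracket_stop cs f 0 (pos + 1) (by omega)]
        · intro hnone; exact absurd hnone (by simp)
      · rw [if_neg hzero]
        have hd'pos : 0 < d' := by
          have : d' ≠ 0 := by omega
          have : d - 1 ≤ d' := by rw [hd']; split_ifs <;> omega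
          omega
        have ihspec := ih (pos + 1) d' f (by omega) hd'pos (by omega)
        rw [hm', hDrel'] at ihspec
        constructor
        · intro e he
          obtain ⟨h1, h2, h3⟩ := ihspec.1 e he
          exact ⟨by rw [hbr]; exact h1, by omega, h3⟩
        · intro hnone
          rw [hbr]; exact ihspec.2 hnone
    · have h0 : cs.length - pos = 0 := by omega
      rw [h0]
      constructor
      · intro e he; exact absurd he (by simp [pvFindEnd])
      · intro _; rw [pvBracket_stop cs fuel d pos (by omega)]; simpa using (by omega : d ≠ 0)

theorem pvFind_none (cs : List Char) : ∀ (fuel i : Nat),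
    (∀ j, i ≤ j → j < cs.length → pvStartsAt cs j = false) → pvFindFrom cs fuel i = none := by
  intro fuel
  induction fuel with
  | zero => intro i _; rfl
  | succ f ih =>
    intro i h
    rw [pvFindFrom]
    by_cases hc : i < cs.length
    · rw [if_pos hc, h i (le_refl i) hc, if_neg (by simp)]
      exact ih (i + 1) (fun j hj hjn => h j (by omega) hjn)
    · rw [if_neg hc]

theorem pvFind_some (cs : List Char) : ∀ (fuel i s : Nat),
    cs.length - i ≤ fuel → i ≤ s → s < cs.length → pvStartsAt cs s = true →
    (∀ j, i ≤ j → j < s → pvStartsAt cs j = false) → pvFindFrom cs fuel i = some s := by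
  intro fuel
  induction fuel with
  | zero => intro i s hf hi hs _ _; omega
  | succ f ih =>
    intro i s hf hi hs hmark hmin
    rw [pvFindFrom, if_pos (by omega)]
    by_cases hesi : i = s
    · subst hesi; rw [hmark]; simp
    · rw [hmin i (le_refl i) (by omega), if_neg (by simp)]
      exact ih (i + 1) s (by omega) (by omega) hs hmark (fun j hj hjs => hmin j (by omega) hjs)

-- the outer loops agree: ms is any sorted list of markers that contains every marker ≥ start
theorem pvOuterEq (cs : List Char) : ∀ (ms : List Nat),
    ms.Pairwise (· < ·) → (∀ s ∈ ms, s < cs.length ∧ pvStartsAt cs s = true) →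
    ∀ (start : Nat) (acc : List String) (fuel : Nat),
    (∀ j, start ≤ j → j < cs.length → pvStartsAt cs j = true → j ∈ ms) → ms.length < fuel →
    pvOuterA cs fuel start acc = pvOuterB cs (pvMkD cs 0) ms start acc := by
  intro ms
  induction ms with
  | nil =>
    intro _ _ start acc fuel hcomp hfuel
    obtain ⟨f, rfl⟩ : ∃ f, fuel = f + 1 := ⟨fuel - 1, by omega⟩
    rw [pvOuterA, pvOuterB,
      pvFind_none cs cs.length start (fun j hj hjn => by
        by_contra hne
        exact absurd (hcomp j hj hjn (by simpa using hne)) (List.not_mem_nil))]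
  | cons s ms ih =>
    intro hpw hmarks start acc fuel hcomp hfuel
    obtain ⟨f, rfl⟩ : ∃ f, fuel = f + 1 := ⟨fuel - 1, by omega⟩
    have hpw' := (List.pairwise_cons.mp hpw).2
    have hgt := (List.pairwise_cons.mp hpw).1
    have hsmark := hmarks s List.mem_cons_self
    rw [pvOuterB]
    by_cases hss : s < start
    · rw [if_pos hss]
      refine ih hpw' (fun x hx => hmarks x (List.mem_cons_of_mem s hx)) start acc (f + 1)
        (fun j hj hjn hjm => ?_) (by simp at hfuel; omega)
      rcases List.mem_cons.mp (hcomp j hj hjn hjm) with h | h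
      · omega
      · exact h
    · rw [if_neg hss]
      have hfind : pvFindFrom cs cs.length start = some s := by
        refine pvFind_some cs cs.length start s (by omega) (by omega) hsmark.1 hsmark.2
          (fun j hj hjs => ?_)
        by_contra hne
        rcases List.mem_cons.mp (hcomp j hj (by omega) (by simpa using hne)) with h | h
        · omega
        · have := hgt j h; omega
      rw [pvOuterA, hfind]
      have hcore := pvBrCore cs cs.length (s + 1) 1 cs.length (by omega) (by omega) (by omega)
      cases hfe : pvFindEnd (pvMkD cs 0) ((pvMkD cs 0).getD (s + 1) 0 - 1) (cs.length - (s + 1)) (s + 1) with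
      | none =>
        have hne := hcore.2 hfe
        simp only []
        rw [if_neg hne]
      | some e =>
        obtain ⟨hbr, hse, hen⟩ := hcore.1 e hfe
        simp only [hbr]
        rw [if_pos trivial]
        refine ih hpw' (fun x hx => hmarks x (List.mem_cons_of_mem s hx)) e _ f
          (fun j hj hjn hjm => ?_) (by simp at hfuel; omega)
        rcases List.mem_cons.mp (hcomp j (by omega) hjn hjm) with h | h
        · omega
        · exact h

theorem pvMarkers_props (cs : List Char) :
    (pvMarkers cs).Pairwise (· < ·) ∧
    (∀ s ∈ pvMarkers cs, s < cs.length ∧ pvStartsAt cs s = true) ∧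
    (∀ j, j < cs.length → pvStartsAt cs j = true → j ∈ pvMarkers cs) ∧
    (pvMarkers cs).length ≤ cs.length := by
  refine ⟨List.Pairwise.filter _ (List.pairwise_lt_range), ?_, ?_, ?_⟩
  · intro s hs
    rw [pvMarkers, List.mem_filter, List.mem_range] at hs
    exact ⟨hs.1, hs.2⟩
  · intro j hj hmark
    rw [pvMarkers, List.mem_filter, List.mem_range]
    exact ⟨hj, hmark⟩
  · calc (pvMarkers cs).length ≤ (List.range cs.length).length := List.length_filter_le _ _
      _ = cs.length := List.length_range

-- ===== VERDICT (by name: the statement is the Claim_ definition above) =====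
theorem split_test_cases_spec : Claim_equal_split_test_cases := by
  intro line _
  unfold Spec_split_test_cases split_test_cases split_test_cases_alt
  obtain ⟨h1, h2, h3, h4⟩ := pvMarkers_props line.toList
  exact pvOuterEq line.toList (pvMarkers line.toList) h1 h2 0 [] (line.toList.length + 1)
    (fun j _ hjn hjm => h3 j hjn hjm) (by omega)
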